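-- pv_equiv track=rewrite | github.com/paiml/depyler | examples/hard_control_flow.py | state_machine
-- ===== SOURCE A (Python) =====
-- def state_machine(commands: list[str]) -> str:
--     """Simple state machine using if/elif chains inside a loop.
--
--     States: "idle", "running", "paused", "stopped"
--     Commands: "start", "pause", "resume", "stop", "reset"
--     Tests complex conditional state transitions with string comparisons.
--     """
--     state: str = "idle"
--
--     for cmd in commands:
--         if state == "idle":
--             if cmd == "start":
--                 state = "running"
--             elif cmd == "stop":
--                 state = "stopped"
--             # else: stay idle (ignore invalid commands)
--         elif state == "running":
--             if cmd == "pause":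
--                 state = "paused"
--             elif cmd == "stop":
--                 state = "stopped"
--             # reset from running goes to idle
--             elif cmd == "reset":
--                 state = "idle"
--         elif state == "paused":
--             if cmd == "resume":
--                 state = "running"
--             elif cmd == "stop":
--                 state = "stopped"
--             elif cmd == "reset":
--                 state = "idle"
--         elif state == "stopped":
--             if cmd == "reset":
--                 state = "idle"
--             # stopped is terminal for all other commands
--
--     return state
-- ===== SOURCE B (Python) =====
-- # Function-composition approach: each command is a total map on the 4 states
-- # (encoded 0=idle,1=running,2=paused,3=stopped); compose all maps right-to-left
-- # into one map, then apply it to the initial state once.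
-- _MAPS = {
--     "start":  (1, 1, 2, 3),
--     "pause":  (0, 2, 2, 3),
--     "resume": (0, 1, 1, 3),
--     "stop":   (3, 3, 3, 3),
--     "reset":  (0, 0, 0, 0),
-- }
-- _NAMES = ("idle", "running", "paused", "stopped")
-- _ID = (0, 1, 2, 3)
--
-- def state_machine(commands: list[str]) -> str:
--     f = _ID
--     for cmd in reversed(commands):
--         g = _MAPS.get(cmd, _ID)
--         f = tuple(f[g[s]] for s in range(4))
--     return _NAMES[f[0]]
-- ===== Notes on version B (the rewrite author's own statement) =====
-- stated objective: alternative
-- what changed: B treats each command as a total transition map on the 4 states (encoded as integers), composes all per-command maps right-to-left into one map, and applies the composite to the initial state once, instead of A's left-to-right single-state walk through nested if/elif chains.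
import Mathlib
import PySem

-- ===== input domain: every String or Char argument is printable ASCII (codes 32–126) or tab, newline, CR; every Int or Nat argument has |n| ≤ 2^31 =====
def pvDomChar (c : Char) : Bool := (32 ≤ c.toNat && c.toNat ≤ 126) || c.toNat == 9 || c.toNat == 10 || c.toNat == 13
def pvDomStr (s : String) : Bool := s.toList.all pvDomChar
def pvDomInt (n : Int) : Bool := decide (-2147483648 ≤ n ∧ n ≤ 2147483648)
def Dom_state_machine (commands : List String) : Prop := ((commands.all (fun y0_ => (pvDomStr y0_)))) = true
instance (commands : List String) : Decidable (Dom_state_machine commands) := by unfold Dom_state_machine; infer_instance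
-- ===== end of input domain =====

-- B composes per-command transition maps on the integer-encoded state set right-to-left and applies the composite once; same return value as A's left-to-right if/elif walk.

-- ===== PORT A =====
def pvStepA (state : String) (cmd : String) : String :=
  if state == "idle" then
    if cmd == "start" then "running"
    else if cmd == "stop" then "stopped"
    else state
  else if state == "running" then
    if cmd == "pause" then "paused"
    else if cmd == "stop" then "stopped"
    else if cmd == "reset" then "idle"
    else state
  else if state == "paused" then
    if cmd == "resume" then "running"
    else if cmd == "stop" then "stopped"
    else if cmd == "reset" then "idle"
    else state
  else if state == "stopped" then
    if cmd == "reset" then "idle"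
    else state
  else state

def state_machine (commands : List String) : String :=
  commands.foldl (fun state cmd => pvStepA state cmd) "idle"

-- ===== PORT B =====
-- _MAPS.get(cmd, _ID): lookup among five distinct literal keys, identity map as default
def pvCmdMap (cmd : String) : Nat × Nat × Nat × Nat :=
  if cmd == "start" then (1, 1, 2, 3)
  else if cmd == "pause" then (0, 2, 2, 3)
  else if cmd == "resume" then (0, 1, 1, 3)
  else if cmd == "stop" then (3, 3, 3, 3)
  else if cmd == "reset" then (0, 0, 0, 0)
  else (0, 1, 2, 3)

-- m[s] on a 4-tuple (indices used are always 0..3)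
def pvApply (m : Nat × Nat × Nat × Nat) (s : Nat) : Nat :=
  match s with
  | 0 => m.1
  | 1 => m.2.1
  | 2 => m.2.2.1
  | _ => m.2.2.2

-- tuple(f[g[s]] for s in range(4))
def pvCompose (f g : Nat × Nat × Nat × Nat) : Nat × Nat × Nat × Nat :=
  (pvApply f (pvApply g 0), pvApply f (pvApply g 1),
   pvApply f (pvApply g 2), pvApply f (pvApply g 3))

-- _NAMES[s]
def pvNames (s : Nat) : String :=
  match s with
  | 0 => "idle"
  | 1 => "running"
  | 2 => "paused"
  | _ => "stopped"

def state_machine_alt (commands : List String) : String :=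
  pvNames (pvApply
    ((commands.reverse).foldl (fun f cmd => pvCompose f (pvCmdMap cmd)) (0, 1, 2, 3)) 0)

-- ===== PRECONDITION & SPEC =====
def Spec_state_machine (commands : List String) (out : String) : Prop := out = state_machine_alt commands
instance (commands : List String) (out : String) : Decidable (Spec_state_machine commands out) := by unfold Spec_state_machine; infer_instance

-- ===== CLAIM (what is proved, stated in full; the proofs are below) =====
def Claim_equal_state_machine : Prop := ∀ (commands : List String), Dom_state_machine commands → Spec_state_machine commands (state_machine commands)

-- ===== LEMMAS AND PROOFS =====

theorem pvCmdMap_apply_lt (c : String) (s : Nat) : pvApply (pvCmdMap c) s < 4 := by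
  unfold pvCmdMap
  split_ifs <;> rcases s with _ | _ | _ | s <;> simp [pvApply]

theorem pvApply_compose (f g : Nat × Nat × Nat × Nat) (s : Nat) (hs : s < 4) :
    pvApply (pvCompose f g) s = pvApply f (pvApply g s) := by
  interval_cases s <;> rfl

theorem pvStep_eq (c : String) (s : Nat) (hs : s < 4) :
    pvStepA (pvNames s) c = pvNames (pvApply (pvCmdMap c) s) := by
  by_cases h1 : "start" = c
  · subst h1; interval_cases s <;> decide
  by_cases h2 : "stop" = c
  · subst h2; interval_cases s <;> decide
  by_cases h3 : "pause" = c
  · subst h3; interval_cases s <;> decide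
  by_cases h4 : "reset" = c
  · subst h4; interval_cases s <;> decide
  by_cases h5 : "resume" = c
  · subst h5; interval_cases s <;> decide
  have m1 : (c == "start") = false := beq_eq_false_iff_ne.mpr (fun e => h1 e.symm)
  have m2 : (c == "stop") = false := beq_eq_false_iff_ne.mpr (fun e => h2 e.symm)
  have m3 : (c == "pause") = false := beq_eq_false_iff_ne.mpr (fun e => h3 e.symm)
  have m4 : (c == "reset") = false := beq_eq_false_iff_ne.mpr (fun e => h4 e.symm)
  have m5 : (c == "resume") = false := beq_eq_false_iff_ne.mpr (fun e => h5 e.symm)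
  interval_cases s <;>
    simp [pvStepA, pvCmdMap, pvApply, pvNames, m1, m2, m3, m4, m5]

theorem pvMain (cs : List String) (s : Nat) (hs : s < 4) :
    cs.foldl (fun state cmd => pvStepA state cmd) (pvNames s)
      = pvNames (pvApply
          ((cs.reverse).foldl (fun f cmd => pvCompose f (pvCmdMap cmd)) (0, 1, 2, 3)) s) := by
  induction cs generalizing s with
  | nil =>
    simp only [List.foldl_nil, List.reverse_nil]
    interval_cases s <;> rfl
  | cons c cs ih =>
    simp only [List.foldl_cons, List.reverse_cons, List.foldl_append, List.foldl_cons,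
      List.foldl_nil]
    rw [pvStep_eq c s hs, ih (pvApply (pvCmdMap c) s) (pvCmdMap_apply_lt c s),
      pvApply_compose _ _ s hs]

-- ===== VERDICT (by name: the statement is the Claim_ definition above) =====
theorem state_machine_spec : Claim_equal_state_machine := by
  intro cs _
  unfold Spec_state_machine state_machine state_machine_alt
  exact pvMain cs 0 (by norm_num)
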